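-- pv_equiv track=rewrite | github.com/SujathaNaga/AdventOfCode | 2023/py/day11.py | calculate_b
-- ===== SOURCE A (Python) =====
-- def calculate_b(start, end, expanded_rows, expanded_cols, expansion):
--     minx=min(start[0],end[0])
--     maxx=max(start[0],end[0])
--     steps=0
--     for x in range(minx, maxx):
--         steps+=expansion if x in expanded_rows else 1
--
--     for y in range(min(start[1],end[1]), max(start[1],end[1])):
--         steps+=expansion if y in expanded_cols else 1
--
--     return steps
-- ===== SOURCE B (Python) =====
-- def calculate_b(start, end, expanded_rows, expanded_cols, expansion):
--     def seg(a, b, expanded):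
--         lo = min(a, b)
--         hi = max(a, b)
--         k = sum(1 for v in set(expanded) if lo <= v < hi)
--         return (hi - lo) + k * (expansion - 1)
--     return seg(start[0], end[0], expanded_rows) + seg(start[1], end[1], expanded_cols)
-- ===== Notes on version B (the rewrite author's own statement) =====
-- stated objective: alternative
-- what changed: Instead of walking every integer in the coordinate range and testing membership per step, B counts the expanded lines that fall inside the range in one pass over the de-duplicated expanded list and computes the distance by the closed form (hi-lo) + count*(expansion-1).
import Mathlib
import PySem

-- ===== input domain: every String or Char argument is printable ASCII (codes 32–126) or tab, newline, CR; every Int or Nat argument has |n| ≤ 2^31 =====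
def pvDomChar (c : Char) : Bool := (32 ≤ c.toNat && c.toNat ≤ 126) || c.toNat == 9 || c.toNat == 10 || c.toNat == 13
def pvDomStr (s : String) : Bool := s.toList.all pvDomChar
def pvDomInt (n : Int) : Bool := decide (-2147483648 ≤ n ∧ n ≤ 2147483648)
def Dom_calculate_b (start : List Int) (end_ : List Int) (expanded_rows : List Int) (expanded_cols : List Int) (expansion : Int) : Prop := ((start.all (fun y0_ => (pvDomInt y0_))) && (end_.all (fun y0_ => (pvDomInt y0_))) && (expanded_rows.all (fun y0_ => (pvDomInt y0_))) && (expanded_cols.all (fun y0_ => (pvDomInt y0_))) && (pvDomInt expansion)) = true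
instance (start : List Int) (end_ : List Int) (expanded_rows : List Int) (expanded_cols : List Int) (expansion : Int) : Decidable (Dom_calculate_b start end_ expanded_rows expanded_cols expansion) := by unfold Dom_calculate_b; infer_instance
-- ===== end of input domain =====

-- ===== PORT A =====
-- B replaces A's per-step walk over the coordinate range by a one-pass count of
-- expanded lines inside the range plus closed-form arithmetic (objective: alternative).
-- A raises IndexError when start or end has fewer than 2 coordinates; Pre_ excludes that.
def calculate_b (start : List Int) (end_ : List Int) (expanded_rows : List Int) (expanded_cols : List Int) (expansion : Int) : Int :=
  let minx := min ((PySem.List.pyGet? start 0).getD 0) ((PySem.List.pyGet? end_ 0).getD 0)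
  let maxx := max ((PySem.List.pyGet? start 0).getD 0) ((PySem.List.pyGet? end_ 0).getD 0)
  let steps := (PySem.List.pyRange minx maxx 1).foldl
    (fun s x => s + (if x ∈ expanded_rows then expansion else 1)) 0
  let steps := (PySem.List.pyRange (min ((PySem.List.pyGet? start 1).getD 0) ((PySem.List.pyGet? end_ 1).getD 0))
                                   (max ((PySem.List.pyGet? start 1).getD 0) ((PySem.List.pyGet? end_ 1).getD 0)) 1).foldl
    (fun s y => s + (if y ∈ expanded_cols then expansion else 1)) steps
  steps

-- ===== PORT B =====
def pvSeg (a b : Int) (expanded : List Int) (expansion : Int) : Int :=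
  (max a b - min a b)
  + ((((PySem.Set.ofList expanded).filter (fun v => decide (min a b ≤ v ∧ v < max a b))).length : Int))
      * (expansion - 1)

def calculate_b_alt (start : List Int) (end_ : List Int) (expanded_rows : List Int) (expanded_cols : List Int) (expansion : Int) : Int :=
  pvSeg ((PySem.List.pyGet? start 0).getD 0) ((PySem.List.pyGet? end_ 0).getD 0) expanded_rows expansion
  + pvSeg ((PySem.List.pyGet? start 1).getD 0) ((PySem.List.pyGet? end_ 1).getD 0) expanded_cols expansion

-- ===== PRECONDITION & SPEC =====
-- Pre_ excludes exactly the inputs where Python A raises IndexError (start or end shorter than 2).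
def Pre_calculate_b (start : List Int) (end_ : List Int) (expanded_rows : List Int) (expanded_cols : List Int) (expansion : Int) : Prop :=
  2 ≤ start.length ∧ 2 ≤ end_.length
instance (start : List Int) (end_ : List Int) (expanded_rows : List Int) (expanded_cols : List Int) (expansion : Int) : Decidable (Pre_calculate_b start end_ expanded_rows expanded_cols expansion) := by unfold Pre_calculate_b; infer_instance

def pvWitness_calculate_b : List Int × List Int × List Int × List Int × Int := ([1, 2], [5, 7], [3], [4, 6], 10)

def Spec_calculate_b (start : List Int) (end_ : List Int) (expanded_rows : List Int) (expanded_cols : List Int) (expansion : Int) (out : Int) : Prop := out = calculate_b_alt start end_ expanded_rows expanded_cols expansion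
instance (start : List Int) (end_ : List Int) (expanded_rows : List Int) (expanded_cols : List Int) (expansion : Int) (out : Int) : Decidable (Spec_calculate_b start end_ expanded_rows expanded_cols expansion out) := by unfold Spec_calculate_b; infer_instance

-- ===== CLAIM (what is proved, stated in full; the proofs are below) =====
def Claim_equal_calculate_b : Prop := ∀ (start : List Int) (end_ : List Int) (expanded_rows : List Int) (expanded_cols : List Int) (expansion : Int), Dom_calculate_b start end_ expanded_rows expanded_cols expansion → Pre_calculate_b start end_ expanded_rows expanded_cols expansion → Spec_calculate_b start end_ expanded_rows expanded_cols expansion (calculate_b start end_ expanded_rows expanded_cols expansion)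

-- ===== LEMMAS AND PROOFS =====

-- Splitting the in-range count of a duplicate-free list at the left endpoint.
lemma pvCountSplit (S : List Int) (hS : S.Nodup) (lo hi : Int) (h : lo < hi) :
    (S.filter (fun v => decide (lo ≤ v ∧ v < hi))).length
      = (if lo ∈ S then 1 else 0) + (S.filter (fun v => decide (lo + 1 ≤ v ∧ v < hi))).length := by
  induction S with
  | nil => simp
  | cons a S ih =>
    rcases List.nodup_cons.mp hS with ⟨ha, hS'⟩
    have ihS := ih hS'
    by_cases hal : a = lo
    · subst hal
      have h1 : (decide (a ≤ a ∧ a < hi)) = true := by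
        simp only [decide_eq_true_eq]; omega
      have h2 : (decide (a + 1 ≤ a ∧ a < hi)) = false := by
        simp only [decide_eq_false_iff_not]; omega
      have hfe : S.filter (fun v => decide (a ≤ v ∧ v < hi))
          = S.filter (fun v => decide (a + 1 ≤ v ∧ v < hi)) := by
        apply List.filter_congr
        intro v hv
        have hva : v ≠ a := fun hva => ha (hva ▸ hv)
        simp only [decide_eq_decide]
        omega
      rw [List.filter_cons, List.filter_cons, hfe, h1, h2,
        if_pos rfl, if_neg Bool.false_ne_true, if_pos (List.mem_cons_self),
        List.length_cons]
      omega
    · have hmem : lo ∈ a :: S ↔ lo ∈ S := by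
        simp only [List.mem_cons]
        refine ⟨fun hx => ?_, Or.inr⟩
        rcases hx with hx | hx
        · exact absurd hx.symm hal
        · exact hx
      have heq : (decide (lo ≤ a ∧ a < hi)) = (decide (lo + 1 ≤ a ∧ a < hi)) := by
        simp only [decide_eq_decide]
        constructor <;> intro hx
        · rcases lt_or_eq_of_le hx.1 with hlt | hle
          · exact ⟨by omega, hx.2⟩
          · exact absurd hle.symm hal
        · omega
      have hif : (if lo ∈ a :: S then (1:Nat) else 0) = if lo ∈ S then 1 else 0 := by
        by_cases hLS : lo ∈ S <;> simp [hmem, hLS]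
      rw [List.filter_cons, List.filter_cons, heq, hif]
      cases hb : decide (lo + 1 ≤ a ∧ a < hi)
      · rw [if_neg Bool.false_ne_true, if_neg Bool.false_ne_true]
        exact ihS
      · rw [if_pos rfl, if_pos rfl, List.length_cons, List.length_cons]
        omega

-- The per-step walk over [lo, hi) equals (hi - lo) plus (count of distinct expanded
-- values inside the range) * (expansion - 1), for any starting accumulator.
lemma pvSegLoop (n : Nat) : ∀ (lo hi : Int), hi - lo = (n : Int) → ∀ (L : List Int) (e c : Int),
    (PySem.List.pyRange lo hi 1).foldl (fun s x => s + (if x ∈ L then e else 1)) c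
      = c + (hi - lo)
        + ((((PySem.Set.ofList L).filter (fun v => decide (lo ≤ v ∧ v < hi))).length : Int)) * (e - 1) := by
  induction n with
  | zero =>
    intro lo hi hn L e c
    have hle : hi ≤ lo := by omega
    have : (PySem.Set.ofList L).filter (fun v => decide (lo ≤ v ∧ v < hi)) = [] := by
      apply List.filter_eq_nil_iff.mpr
      intro v _
      simp only [decide_eq_true_eq]
      omega
    rw [PySem.List.pyRange_one_eq_nil hle, this]
    simp only [List.foldl_nil, List.length_nil, Nat.cast_zero]
    omega
  | succ m ih =>
    intro lo hi hn L e c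
    have hlt : lo < hi := by omega
    rw [PySem.List.pyRange_one_cons hlt]
    simp only [List.foldl_cons]
    rw [ih (lo + 1) hi (by omega) L e (c + (if lo ∈ L then e else 1))]
    rw [pvCountSplit (PySem.Set.ofList L) (PySem.Set.nodup_ofList L) lo hi hlt]
    have hmem : (lo ∈ PySem.Set.ofList L) ↔ (lo ∈ L) := PySem.Set.mem_ofList L lo
    by_cases hL : lo ∈ L
    · simp only [hL, if_true, hmem.mpr hL, if_pos]
      push_cast
      ring
    · simp only [hL, if_false]
      rw [if_neg (fun hx => hL (hmem.mp hx))]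
      push_cast
      ring

-- ===== VERDICT (by name: the statement is the Claim_ definition above) =====
theorem calculate_b_spec : Claim_equal_calculate_b := by
  intro start end_ expanded_rows expanded_cols expansion _ _
  unfold Spec_calculate_b
  simp only [calculate_b, calculate_b_alt, pvSeg]
  set sx := (PySem.List.pyGet? start 0).getD 0
  set ex := (PySem.List.pyGet? end_ 0).getD 0
  set sy := (PySem.List.pyGet? start 1).getD 0
  set ey := (PySem.List.pyGet? end_ 1).getD 0
  have h1 := pvSegLoop (max sx ex - min sx ex).toNat (min sx ex) (max sx ex)
    (by omega) expanded_rows expansion 0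
  have h2 := pvSegLoop (max sy ey - min sy ey).toNat (min sy ey) (max sy ey)
    (by omega) expanded_cols expansion
    ((PySem.List.pyRange (min sx ex) (max sx ex) 1).foldl
      (fun s x => s + (if x ∈ expanded_rows then expansion else 1)) 0)
  rw [h2, h1]
  ring
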